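-- pv_equiv track=rewrite | github.com/scrapy/itemadapter | itemadapter/adapter.py | _is_json_schema_pattern
-- ===== SOURCE A (Python) =====
-- def _is_json_schema_pattern(pattern: str) -> bool:
--     # https://ecma-international.org/publications-and-standards/standards/ecma-262/
--     #
--     # Note: We allow word boundaries (\b, \B) in patterns even thought there is
--     # a difference in behavior: in Python, they work with Unicode; in JSON
--     # Schema, they only work with ASCII.
--     unsupported = [
--         "(?P<",  # named groups
--         "(?<=",  # lookbehind
--         "(?<!",  # negative lookbehind
--         "(?>",  # atomic group
--         "\\A",  # start of string
--         "\\Z",  # end of string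
--         "(?i)",  # inline flags (case-insensitive, etc.)
--         "(?m)",  # multiline
--         "(?s)",  # dotall
--         "(?x)",  # verbose
--         "(?#",  # comments
--     ]
--     return not any(sub in pattern for sub in unsupported)
-- ===== SOURCE B (Python) =====
-- def _is_json_schema_pattern(pattern: str) -> bool:
--     # Single left-to-right scan: dispatch on the current character and look at
--     # (at most) the next three, instead of eleven independent substring searches.
--     for i in range(len(pattern)):
--         c = pattern[i]
--         if c == "\\":
--             if pattern[i + 1 : i + 2] in ("A", "Z"):
--                 return False
--         elif c == "(":
--             if pattern[i + 1 : i + 3] in ("?>", "?#") or pattern[i + 1 : i + 4] in (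
--                 "?P<", "?<=", "?<!", "?i)", "?m)", "?s)", "?x)"
--             ):
--                 return False
--     return True
-- ===== Notes on version B (the rewrite author's own statement) =====
-- stated objective: alternative
-- what changed: Replaced eleven independent substring-containment scans of the pattern with a single left-to-right scan that dispatches on whether the current character is a backslash or an opening parenthesis and inspects at most the next three characters.
import Mathlib
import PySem

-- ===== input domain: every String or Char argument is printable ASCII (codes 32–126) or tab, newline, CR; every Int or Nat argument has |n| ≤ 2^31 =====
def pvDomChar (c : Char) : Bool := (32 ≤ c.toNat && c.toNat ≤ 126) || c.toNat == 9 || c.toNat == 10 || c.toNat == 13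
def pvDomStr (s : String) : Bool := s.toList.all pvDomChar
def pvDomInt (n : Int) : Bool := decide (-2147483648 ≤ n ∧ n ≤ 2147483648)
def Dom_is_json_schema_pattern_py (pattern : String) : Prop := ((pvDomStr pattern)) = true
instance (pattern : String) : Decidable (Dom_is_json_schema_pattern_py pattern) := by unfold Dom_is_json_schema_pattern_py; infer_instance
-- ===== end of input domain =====

-- B changes the algorithm: one left-to-right scan dispatching on the current character
-- instead of eleven independent substring searches; objective: alternative.

-- ===== PORT A =====
def pvUnsupported : List String :=
  ["(?P<", "(?<=", "(?<!", "(?>", "\\A", "\\Z", "(?i)", "(?m)", "(?s)", "(?x)", "(?#"]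

def is_json_schema_pattern_py (pattern : String) : Bool :=
  -- `not any(sub in pattern for sub in unsupported)`
  ! pvUnsupported.any (fun sub => PySem.Str.isIn sub pattern)

-- ===== PORT B =====
-- the `for i in range(len(pattern))` loop of Source B, as structural recursion on the
-- suffix starting at i; `rest.take k` is exactly the slice pattern[i+1:i+1+k].
def pvScan : List Char → Bool
  | [] => true
  | c :: rest =>
    if c = '\\' then
      if rest.take 1 = ['A'] ∨ rest.take 1 = ['Z'] then false else pvScan rest
    else if c = '(' then
      if rest.take 2 = ['?', '>'] ∨ rest.take 2 = ['?', '#'] ∨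
         rest.take 3 = ['?', 'P', '<'] ∨ rest.take 3 = ['?', '<', '='] ∨
         rest.take 3 = ['?', '<', '!'] ∨ rest.take 3 = ['?', 'i', ')'] ∨
         rest.take 3 = ['?', 'm', ')'] ∨ rest.take 3 = ['?', 's', ')'] ∨
         rest.take 3 = ['?', 'x', ')'] then false
      else pvScan rest
    else pvScan rest

def is_json_schema_pattern_py_alt (pattern : String) : Bool :=
  pvScan pattern.toList


-- ===== PRECONDITION & SPEC =====
def Spec_is_json_schema_pattern_py (pattern : String) (out : Bool) : Prop := out = is_json_schema_pattern_py_alt pattern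
instance (pattern : String) (out : Bool) : Decidable (Spec_is_json_schema_pattern_py pattern out) := by unfold Spec_is_json_schema_pattern_py; infer_instance

-- ===== CLAIM (what is proved, stated in full; the proofs are below) =====
def Claim_equal_is_json_schema_pattern_py : Prop := ∀ (pattern : String), Dom_is_json_schema_pattern_py pattern → Spec_is_json_schema_pattern_py pattern (is_json_schema_pattern_py pattern)

-- ===== LEMMAS AND PROOFS =====
-- the eleven forbidden constructs as character lists
def pvSCl : List (List Char) := pvUnsupported.map String.toList

-- the per-position check of pvScan fires exactly when some forbidden construct
-- is a prefix of the current suffix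
lemma pvHit_cons (c : Char) (l : List Char) :
  (∃ sub ∈ pvSCl, sub <+: c :: l) ↔
    (c = '\\' ∧ (l.take 1 = ['A'] ∨ l.take 1 = ['Z'])) ∨
    (c = '(' ∧ (l.take 2 = ['?','>'] ∨ l.take 2 = ['?','#'] ∨ l.take 3 = ['?','P','<'] ∨
      l.take 3 = ['?','<','='] ∨ l.take 3 = ['?','<','!'] ∨ l.take 3 = ['?','i',')'] ∨
      l.take 3 = ['?','m',')'] ∨ l.take 3 = ['?','s',')'] ∨ l.take 3 = ['?','x',')'])) := by
  simp [pvSCl, pvUnsupported, List.prefix_iff_eq_take, eq_comm]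
  tauto

-- the single scan succeeds iff no forbidden construct occurs as an infix
lemma pvScan_iff (l : List Char) : pvScan l = true ↔ ∀ sub ∈ pvSCl, ¬ sub <:+: l := by
  induction l with
  | nil => simpa [pvScan] using (by decide : ∀ sub ∈ pvSCl, ¬ sub <:+: ([] : List Char))
  | cons c l ih =>
    have hstep : (∀ sub ∈ pvSCl, ¬ sub <:+: c :: l) ↔
        (¬ ∃ sub ∈ pvSCl, sub <+: c :: l) ∧ ∀ sub ∈ pvSCl, ¬ sub <:+: l := by
      simp only [List.infix_cons_iff, not_or]
      aesop
    rw [hstep, pvHit_cons, ← ih]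
    simp only [pvScan]
    split_ifs with h1 h2 h3 h4 <;> simp_all

-- ===== VERDICT (by name: the statement is the Claim_ definition above) =====
theorem is_json_schema_pattern_py_spec : Claim_equal_is_json_schema_pattern_py := by
  intro pattern _
  unfold Spec_is_json_schema_pattern_py
  rw [Bool.eq_iff_iff, is_json_schema_pattern_py_alt, pvScan_iff]
  simp [is_json_schema_pattern_py, pvSCl, PySem.Chars.isIn_eq_false_iff]
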